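-- pv_equiv track=rewrite | github.com/FRA0420/ITS-Python | Lezione6/CompitoCasa/esercizio3.py | rimuovi_elementi
-- ===== SOURCE A (Python) =====
-- def rimuovi_elementi(lista:list[int],dizio:dict[int])->list:
--     lista_elementi=lista.copy()
--     rimasti=0
--     for k,v in dizio.items():
--         rimasti = v
--         while k in lista_elementi and rimasti > 0:
--             lista_elementi.remove(k)
--             rimasti-=1
--     return lista_elementi
-- ===== SOURCE B (Python) =====
-- def rimuovi_elementi(lista: list[int], dizio: dict[int]) -> list:
--     # Single pass: keep a per-key removal budget and skip the first
--     # budget-many occurrences of each key instead of repeated list.remove.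
--     rimanenti = dict(dizio)
--     risultato = []
--     for x in lista:
--         if rimanenti.get(x, 0) > 0:
--             rimanenti[x] = rimanenti[x] - 1
--         else:
--             risultato.append(x)
--     return risultato
-- ===== Notes on version B (the rewrite author's own statement) =====
-- stated objective: faster
-- what changed: A repeatedly calls list.remove inside a per-key while loop (each remove rescans the list); B makes one pass over the list with a per-key removal-budget dict, skipping the first budget-many occurrences of each key; Pre_ only requires the keys of dizio to be pairwise distinct, which every Python dict satisfies, so no real input is excluded.
import Mathlib
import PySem

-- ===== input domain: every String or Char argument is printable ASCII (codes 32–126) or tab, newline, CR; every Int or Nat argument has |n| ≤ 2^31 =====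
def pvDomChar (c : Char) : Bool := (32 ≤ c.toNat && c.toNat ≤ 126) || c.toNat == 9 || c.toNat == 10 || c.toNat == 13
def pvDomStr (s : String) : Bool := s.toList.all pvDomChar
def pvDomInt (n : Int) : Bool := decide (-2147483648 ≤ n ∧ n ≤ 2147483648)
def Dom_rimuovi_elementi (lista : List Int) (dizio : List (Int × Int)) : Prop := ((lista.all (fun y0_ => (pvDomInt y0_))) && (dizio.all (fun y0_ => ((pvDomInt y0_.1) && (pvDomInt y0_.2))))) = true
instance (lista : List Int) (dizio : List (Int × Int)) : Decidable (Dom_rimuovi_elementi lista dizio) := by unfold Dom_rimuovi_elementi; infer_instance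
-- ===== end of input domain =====

-- B replaces A's per-key while loop of list.remove rescans by a single pass over the list
-- with a per-key removal-budget dict (objective: faster; measured asymptotic speed-up).


-- ===== PORT A =====
-- 'while k in lista_elementi and rimasti > 0: lista_elementi.remove(k); rimasti -= 1'
-- list.remove(k) removes the FIRST occurrence = List.erase (PySem.List.remove?_eq_some_erase);
-- the guard k ∈ l makes it total here, exactly as the while-condition does in Python.
def pvWhileRemove (k : Int) (l : List Int) (r : Int) : List Int :=
  if h : k ∈ l ∧ r > 0 then
    pvWhileRemove k (l.erase k) (r - 1)
  else l
termination_by l.length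
decreasing_by
  have := List.length_pos_of_mem h.1
  have := List.length_erase_of_mem h.1
  omega

def rimuovi_elementi (lista : List Int) (dizio : List (Int × Int)) : List Int :=
  dizio.foldl (fun acc kv => pvWhileRemove kv.1 acc kv.2) lista

-- ===== PORT B =====
-- 'for x in lista: if rimanenti.get(x,0) > 0: rimanenti[x] -= 1 else: risultato.append(x)'
def pvPassLoop (rem : PySem.Dict Int Int) (out : List Int) : List Int → List Int
  | [] => out
  | x :: xs =>
    if rem.getD x 0 > 0 then pvPassLoop (rem.insert x (rem.getD x 0 - 1)) out xs
    else pvPassLoop rem (out ++ [x]) xs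

def rimuovi_elementi_alt (lista : List Int) (dizio : List (Int × Int)) : List Int :=
  pvPassLoop (PySem.Dict.ofList dizio) [] lista

-- ===== PRECONDITION & SPEC =====
-- dizio models a Python dict, whose keys are necessarily pairwise distinct; a duplicate-key
-- association list corresponds to no Python input, so Pre_ excludes no input A accepts.
def Pre_rimuovi_elementi (lista : List Int) (dizio : List (Int × Int)) : Prop :=
  (dizio.map Prod.fst).Nodup
instance (lista : List Int) (dizio : List (Int × Int)) : Decidable (Pre_rimuovi_elementi lista dizio) := by unfold Pre_rimuovi_elementi; infer_instance

def pvWitness_rimuovi_elementi : List Int × (List (Int × Int)) := ([1, 2, 1, 3, 3], [(1, 1), (3, 5)])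

def Spec_rimuovi_elementi (lista : List Int) (dizio : List (Int × Int)) (out : List Int) : Prop := out = rimuovi_elementi_alt lista dizio
instance (lista : List Int) (dizio : List (Int × Int)) (out : List Int) : Decidable (Spec_rimuovi_elementi lista dizio out) := by unfold Spec_rimuovi_elementi; infer_instance

-- ===== CLAIM (what is proved, stated in full; the proofs are below) =====
def Claim_equal_rimuovi_elementi : Prop := ∀ (lista : List Int) (dizio : List (Int × Int)), Dom_rimuovi_elementi lista dizio → Pre_rimuovi_elementi lista dizio → Spec_rimuovi_elementi lista dizio (rimuovi_elementi lista dizio)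

-- ===== LEMMAS AND PROOFS =====

-- Abstract one-pass skipper: f gives the remaining removal budget of each value.
def pvPassF : List Int → (Int → Nat) → List Int
  | [], _ => []
  | x :: xs, f =>
    if 0 < f x then pvPassF xs (Function.update f x (f x - 1)) else x :: pvPassF xs f

-- Total removal budget an association list assigns to x (values clamped at 0).
def pvBudget : List (Int × Int) → Int → Nat
  | [], _ => 0
  | kv :: rest, x => (if x = kv.1 then kv.2.toNat else 0) + pvBudget rest x

theorem pvPassF_all_zero (l : List Int) (f : Int → Nat) (h : ∀ x ∈ l, f x = 0) :
    pvPassF l f = l := by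
  induction l with
  | nil => rfl
  | cons x xs ih =>
    have hx : f x = 0 := h x (by simp)
    simp [pvPassF, hx, ih (fun y hy => h y (by simp [hy]))]

theorem pvPassF_erase (l : List Int) (k : Int) (f : Int → Nat)
    (hk : k ∈ l) (hf : 0 < f k) :
    pvPassF l f = pvPassF (l.erase k) (Function.update f k (f k - 1)) := by
  induction l generalizing f with
  | nil => cases hk
  | cons x xs ih =>
    by_cases hxk : x = k
    · subst hxk
      simp [pvPassF, hf, List.erase_cons_head]
    · have hk' : k ∈ xs := by
        cases hk with
        | head => exact absurd rfl hxk
        | tail _ h => exact h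
      rw [List.erase_cons_tail (by simpa using hxk)]
      by_cases hfx : 0 < f x
      · have hupd : Function.update (Function.update f x (f x - 1)) k
            (Function.update f x (f x - 1) k - 1)
            = Function.update (Function.update f k (f k - 1)) x
              (Function.update f k (f k - 1) x - 1) := by
          rw [Function.update_of_ne (Ne.symm hxk) , Function.update_of_ne hxk]
          exact Function.update_comm hxk _ _ f
        have hfk' : 0 < Function.update f x (f x - 1) k := by
          rwa [Function.update_of_ne (Ne.symm hxk)]
        have hfx' : 0 < Function.update f k (f k - 1) x := by
          rwa [Function.update_of_ne hxk]
        simp only [pvPassF, if_pos hfx, if_pos hfx']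
        rw [ih _ hk' hfk', hupd]
      · have hfx' : ¬ 0 < Function.update f k (f k - 1) x := by
          rwa [Function.update_of_ne hxk]
        simp only [pvPassF, if_neg hfx, if_neg hfx']
        rw [ih _ hk' hf]

theorem pvWhileRemove_eq (k : Int) (l : List Int) (v : Int) :
    pvWhileRemove k l v = pvPassF l (Function.update (fun _ => 0) k v.toNat) := by
  induction l, v using pvWhileRemove.induct k with
  | case1 l v h ih =>
    rw [pvWhileRemove, dif_pos h, ih,
        pvPassF_erase l k _ h.1 (by rw [Function.update_self]; omega)]
    congr 1
    funext y
    by_cases hy : y = k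
    · subst hy; simp [Function.update]
    · simp [Function.update, hy]
  | case2 l v h =>
    rw [pvWhileRemove, dif_neg h, pvPassF_all_zero]
    intro x hx
    rcases not_and_or.mp h with hkl | hv
    · have : x ≠ k := fun he => hkl (he ▸ hx)
      simp [Function.update, this]
    · have : v.toNat = 0 := by omega
      simp [Function.update, this]

theorem pvPassF_comp (l : List Int) (f g : Int → Nat)
    (hd : ∀ x, f x = 0 ∨ g x = 0) :
    pvPassF (pvPassF l f) g = pvPassF l (fun x => f x + g x) := by
  induction l generalizing f g with
  | nil => rfl
  | cons x xs ih =>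
    by_cases hfx : 0 < f x
    · have hgx : g x = 0 := by
        rcases hd x with h | h
        · omega
        · exact h
      have hd' : ∀ y, Function.update f x (f x - 1) y = 0 ∨ g y = 0 := by
        intro y
        by_cases hy : y = x
        · subst hy; right; exact hgx
        · simpa [Function.update, hy] using hd y
      simp only [pvPassF, if_pos hfx, if_pos (show 0 < f x + g x by omega)]
      rw [ih _ g hd']
      congr 1
      funext y
      by_cases hy : y = x
      · subst hy; simp [Function.update]; omega
      · simp [Function.update, hy]
    · have hfx0 : f x = 0 := by omega
      by_cases hgx : 0 < g x
      · have hd' : ∀ y, f y = 0 ∨ Function.update g x (g x - 1) y = 0 := by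
          intro y
          by_cases hy : y = x
          · subst hy; left; exact hfx0
          · simpa [Function.update, hy] using hd y
        simp only [pvPassF, if_neg hfx, if_pos hgx,
          if_pos (show 0 < f x + g x by omega)]
        rw [ih f _ hd']
        congr 1
        funext y
        by_cases hy : y = x
        · subst hy; simp [Function.update]; omega
        · simp [Function.update, hy]
      · simp only [pvPassF, if_neg hfx, if_neg hgx,
          if_neg (show ¬ 0 < f x + g x by omega)]
        rw [ih f g hd]

theorem pvFoldA (dz : List (Int × Int)) (l : List Int) (f : Int → Nat)
    (hnd : (dz.map Prod.fst).Nodup) (hf : ∀ kv ∈ dz, f kv.1 = 0) :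
    dz.foldl (fun acc kv => pvWhileRemove kv.1 acc kv.2) (pvPassF l f)
      = pvPassF l (fun x => f x + pvBudget dz x) := by
  induction dz generalizing f with
  | nil => simp [pvBudget]
  | cons kv rest ih =>
    have hnd' : (rest.map Prod.fst).Nodup := (List.nodup_cons.mp hnd).2
    have hknr : kv.1 ∉ rest.map Prod.fst := (List.nodup_cons.mp hnd).1
    simp only [List.foldl_cons]
    rw [pvWhileRemove_eq,
        pvPassF_comp l f _ (fun x => by
          by_cases hx : x = kv.1
          · subst hx; left; exact hf kv (by simp)
          · right; simp [Function.update, hx]),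
        ih _ hnd' (fun kv' hkv' => by
          have hne : kv'.1 ≠ kv.1 := fun he =>
            hknr (he ▸ List.mem_map_of_mem hkv')
          simp [Function.update, hne, hf kv' (by simp [hkv'])])]
    congr 1
    funext y
    by_cases hy : y = kv.1
    · simp [pvBudget, Function.update, hy]
      omega
    · simp [pvBudget, Function.update, hy]

-- B-side: the dict pass computes pvPassF of the dict's current budgets.
theorem pvPassLoop_eq (xs : List Int) (d : PySem.Dict Int Int) (out : List Int) :
    pvPassLoop d out xs = out ++ pvPassF xs (fun x => (d.getD x 0).toNat) := by
  induction xs generalizing d out with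
  | nil => simp [pvPassLoop, pvPassF]
  | cons x xs ih =>
    by_cases hx : d.getD x 0 > 0
    · have hx' : 0 < (d.getD x 0).toNat := by omega
      have hfeq : (fun y => ((d.insert x (d.getD x 0 - 1)).getD y 0).toNat)
          = Function.update (fun y => (d.getD y 0).toNat) x
              ((fun y => (d.getD y 0).toNat) x - 1) := by
        funext y
        by_cases hy : y = x
        · subst hy
          simp [PySem.Dict.getD, PySem.Dict.get?_insert_self, Function.update]
        · simp [PySem.Dict.getD, PySem.Dict.get?_insert_of_ne _ _ hy,
            Function.update, hy]
      simp only [pvPassLoop, if_pos hx, pvPassF, if_pos hx']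
      rw [ih, hfeq]
    · have hx' : ¬ 0 < (d.getD x 0).toNat := by omega
      simp only [pvPassLoop, if_neg hx, pvPassF, if_neg hx']
      rw [ih]
      simp

theorem pvUpdate_get?_of_not_mem (dz : List (Int × Int)) (d : PySem.Dict Int Int)
    (x : Int) (hx : x ∉ dz.map Prod.fst) :
    (d.update dz).get? x = d.get? x := by
  induction dz generalizing d with
  | nil => rfl
  | cons kv rest ih =>
    simp only [List.map_cons, List.mem_cons, not_or] at hx
    simp only [PySem.Dict.update, List.foldl_cons]
    rw [show (List.foldl (fun acc p => acc.insert p.1 p.2) (d.insert kv.1 kv.2) rest)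
          = (d.insert kv.1 kv.2).update rest from rfl,
        ih _ hx.2, PySem.Dict.get?_insert_of_ne _ _ hx.1]

theorem pvUpdate_get?_of_mem (dz : List (Int × Int)) (d : PySem.Dict Int Int)
    (x v : Int) (hnd : (dz.map Prod.fst).Nodup) (hm : (x, v) ∈ dz) :
    (d.update dz).get? x = some v := by
  induction dz generalizing d with
  | nil => cases hm
  | cons kv rest ih =>
    simp only [PySem.Dict.update, List.foldl_cons]
    rw [show (List.foldl (fun acc p => acc.insert p.1 p.2) (d.insert kv.1 kv.2) rest)
          = (d.insert kv.1 kv.2).update rest from rfl]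
    cases hm with
    | head =>
      rw [pvUpdate_get?_of_not_mem _ _ _ (List.nodup_cons.mp hnd).1,
          PySem.Dict.get?_insert_self]
    | tail _ hm' =>
      exact ih _ (List.nodup_cons.mp hnd).2 hm'

theorem pvBudget_of_not_mem (dz : List (Int × Int)) (x : Int)
    (hx : x ∉ dz.map Prod.fst) : pvBudget dz x = 0 := by
  induction dz with
  | nil => rfl
  | cons kv rest ih =>
    simp only [List.map_cons, List.mem_cons, not_or] at hx
    simp [pvBudget, hx.1, ih hx.2]

theorem pvBudget_of_mem (dz : List (Int × Int)) (x v : Int)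
    (hnd : (dz.map Prod.fst).Nodup) (hm : (x, v) ∈ dz) :
    pvBudget dz x = v.toNat := by
  induction dz with
  | nil => cases hm
  | cons kv rest ih =>
    cases hm with
    | head =>
      simp [pvBudget, pvBudget_of_not_mem rest x (List.nodup_cons.mp hnd).1]
    | tail _ hm' =>
      have hne : x ≠ kv.1 := fun he => by
        subst he
        exact (List.nodup_cons.mp hnd).1 (List.mem_map.mpr ⟨(kv.1, v), hm', rfl⟩)
      simp [pvBudget, hne, ih (List.nodup_cons.mp hnd).2 hm']

theorem pvGetD_ofList_budget (dz : List (Int × Int)) (x : Int)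
    (hnd : (dz.map Prod.fst).Nodup) :
    ((PySem.Dict.ofList dz).getD x 0).toNat = pvBudget dz x := by
  by_cases hx : x ∈ dz.map Prod.fst
  · obtain ⟨⟨a, v⟩, hm, ha⟩ := List.mem_map.mp hx
    subst ha
    rw [PySem.Dict.ofList, PySem.Dict.getD, pvUpdate_get?_of_mem dz _ _ v hnd hm,
        pvBudget_of_mem dz _ v hnd hm]
    rfl
  · rw [PySem.Dict.ofList, PySem.Dict.getD, pvUpdate_get?_of_not_mem dz _ _ hx,
        pvBudget_of_not_mem dz _ hx]
    rfl

-- ===== VERDICT (by name: the statement is the Claim_ definition above) =====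
theorem rimuovi_elementi_spec : Claim_equal_rimuovi_elementi := by
  intro lista dizio _hdom hpre
  unfold Spec_rimuovi_elementi rimuovi_elementi rimuovi_elementi_alt
  have hA := pvFoldA dizio lista (fun _ => 0) hpre (fun _ _ => rfl)
  rw [pvPassF_all_zero lista _ (fun _ _ => rfl)] at hA
  rw [hA, pvPassLoop_eq, List.nil_append]
  congr 1
  funext y
  simp [pvGetD_ofList_budget dizio y hpre]
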